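-- pv_equiv track=rewrite | github.com/GuiiFg/Algoritmos-de-busca | NumberPuzzle/gameState.py | __LoadState
-- ===== SOURCE A (Python) =====
-- def __LoadState(stateList : list):
--
--     layer0 = []
--     layer1 = []
--     layer2 = []
--
--     for value in stateList:
--         if len(layer0) < 3:
--             layer0.append(value)
--         elif len(layer1) < 3:
--             layer1.append(value)
--         elif len(layer2) < 3:
--             layer2.append(value)
--
--     return [layer0, layer1, layer2]
-- ===== SOURCE B (Python) =====
-- def __LoadState(stateList : list):
--     return [stateList[0:3], stateList[3:6], stateList[6:9]]
-- ===== Notes on version B (the rewrite author's own statement) =====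
-- stated objective: simpler
-- what changed: Replaces the element-by-element loop with three length-guarded accumulators by a direct partition into the fixed slices [0:3], [3:6], [6:9] (extra elements past index 9 are dropped by the slice bound, exactly as A's guards drop them).
import Mathlib
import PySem

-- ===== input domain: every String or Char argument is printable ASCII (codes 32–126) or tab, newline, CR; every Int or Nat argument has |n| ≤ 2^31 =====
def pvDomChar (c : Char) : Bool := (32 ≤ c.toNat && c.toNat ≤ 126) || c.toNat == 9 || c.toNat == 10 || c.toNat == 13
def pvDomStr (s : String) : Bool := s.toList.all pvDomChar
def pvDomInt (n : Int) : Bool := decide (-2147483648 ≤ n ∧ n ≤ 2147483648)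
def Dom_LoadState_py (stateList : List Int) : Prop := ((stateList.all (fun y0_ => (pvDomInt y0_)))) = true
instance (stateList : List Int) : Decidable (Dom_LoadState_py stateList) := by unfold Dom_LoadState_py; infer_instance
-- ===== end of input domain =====

-- B partitions the list into the fixed slices [0:3], [3:6], [6:9] instead of A's append loop; objective: simpler.


-- ===== PORT A =====
-- the loop body: fill layer0 up to 3 elements, then layer1, then layer2, else drop
def LoadState_step (st : List Int × List Int × List Int) (value : Int) : List Int × List Int × List Int :=
  if st.1.length < 3 then (st.1 ++ [value], st.2.1, st.2.2)
  else if st.2.1.length < 3 then (st.1, st.2.1 ++ [value], st.2.2)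
  else if st.2.2.length < 3 then (st.1, st.2.1, st.2.2 ++ [value])
  else st

def LoadState_py (stateList : List Int) : List (List Int) :=
  let st := stateList.foldl LoadState_step ([], [], [])
  [st.1, st.2.1, st.2.2]

-- ===== PORT B =====
def LoadState_py_alt (stateList : List Int) : List (List Int) :=
  [PySem.List.slice stateList (some 0) (some 3),
   PySem.List.slice stateList (some 3) (some 6),
   PySem.List.slice stateList (some 6) (some 9)]

-- ===== PRECONDITION & SPEC =====
def Spec_LoadState_py (stateList : List Int) (out : List (List Int)) : Prop := out = LoadState_py_alt stateList
instance (stateList : List Int) (out : List (List Int)) : Decidable (Spec_LoadState_py stateList out) := by unfold Spec_LoadState_py; infer_instance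

-- ===== CLAIM (what is proved, stated in full; the proofs are below) =====
def Claim_equal_LoadState_py : Prop := ∀ (stateList : List Int), Dom_LoadState_py stateList → Spec_LoadState_py stateList (LoadState_py stateList)

-- ===== LEMMAS AND PROOFS =====

-- phase 3: all layers full — the loop drops the rest
theorem loadState_phase3 (xs l0 l1 l2 : List Int)
    (h0 : l0.length = 3) (h1 : l1.length = 3) (h2 : l2.length = 3) :
    xs.foldl LoadState_step (l0, l1, l2) = (l0, l1, l2) := by
  induction xs with
  | nil => rfl
  | cons x xs ih =>
      simp [List.foldl, LoadState_step, h0, h1, h2, ih]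

-- phase 2: layers 0,1 full — layer2 absorbs up to 3 − |l2| elements
theorem loadState_phase2 (xs : List Int) : ∀ (l0 l1 l2 : List Int),
    l0.length = 3 → l1.length = 3 → l2.length ≤ 3 →
    xs.foldl LoadState_step (l0, l1, l2) = (l0, l1, l2 ++ xs.take (3 - l2.length)) := by
  induction xs with
  | nil => intro l0 l1 l2 _ _ _; simp
  | cons x xs ih =>
      intro l0 l1 l2 h0 h1 h2
      by_cases hl : l2.length < 3
      · have step : LoadState_step (l0, l1, l2) x = (l0, l1, l2 ++ [x]) := by
          simp [LoadState_step, h0, h1, hl]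
        have := ih l0 l1 (l2 ++ [x]) h0 h1 (by simp; omega)
        simp only [List.foldl, step, this]
        have hlen : (l2 ++ [x]).length = l2.length + 1 := by simp
        rw [hlen]
        have h3 : 3 - l2.length = (3 - (l2.length + 1)) + 1 := by omega
        rw [h3, List.take_succ_cons]
        simp
      · have h2' : l2.length = 3 := by omega
        have hfull := loadState_phase3 xs l0 l1 l2 h0 h1 h2'
        simp [List.foldl, LoadState_step, h0, h1, h2', hfull]

-- phase 1: layer 0 full, layer2 empty — layer1 fills, then layer2 takes the next 3
theorem loadState_phase1 (xs : List Int) : ∀ (l0 l1 : List Int),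
    l0.length = 3 → l1.length ≤ 3 →
    xs.foldl LoadState_step (l0, l1, []) =
      (l0, l1 ++ xs.take (3 - l1.length), (xs.drop (3 - l1.length)).take 3) := by
  induction xs with
  | nil => intro l0 l1 _ _; simp
  | cons x xs ih =>
      intro l0 l1 h0 h1
      by_cases hl : l1.length < 3
      · have step : LoadState_step (l0, l1, ([] : List Int)) x = (l0, l1 ++ [x], []) := by
          simp [LoadState_step, h0, hl]
        have := ih l0 (l1 ++ [x]) h0 (by simp; omega)
        simp only [List.foldl, step, this]
        have hlen : (l1 ++ [x]).length = l1.length + 1 := by simp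
        rw [hlen]
        have h3 : 3 - l1.length = (3 - (l1.length + 1)) + 1 := by omega
        rw [h3, List.take_succ_cons, List.drop_succ_cons]
        simp
      · have h1' : l1.length = 3 := by omega
        have step : LoadState_step (l0, l1, ([] : List Int)) x = (l0, l1, [x]) := by
          simp [LoadState_step, h0, h1']
        have := loadState_phase2 xs l0 l1 [x] h0 h1' (by simp)
        simp only [List.foldl, step, this]
        simp [h1']

-- phase 0: all layers empty — full characterisation of A's loop
theorem loadState_phase0 (xs : List Int) : ∀ (l0 : List Int), l0.length ≤ 3 →
    xs.foldl LoadState_step (l0, [], []) =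
      (l0 ++ xs.take (3 - l0.length),
       ((xs.drop (3 - l0.length)).take 3),
       (((xs.drop (3 - l0.length)).drop 3).take 3)) := by
  induction xs with
  | nil => intro l0 _; simp
  | cons x xs ih =>
      intro l0 h0
      by_cases hl : l0.length < 3
      · have step : LoadState_step (l0, [], ([] : List Int)) x = (l0 ++ [x], [], []) := by
          simp [LoadState_step, hl]
        have := ih (l0 ++ [x]) (by simp; omega)
        simp only [List.foldl, step, this]
        have hlen : (l0 ++ [x]).length = l0.length + 1 := by simp
        rw [hlen]
        have h3 : 3 - l0.length = (3 - (l0.length + 1)) + 1 := by omega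
        rw [h3, List.take_succ_cons, List.drop_succ_cons]
        simp
      · have h0' : l0.length = 3 := by omega
        have step : LoadState_step (l0, [], ([] : List Int)) x = (l0, [x], []) := by
          simp [LoadState_step, h0']
        have := loadState_phase1 xs l0 [x] h0' (by simp)
        simp only [List.foldl, step, this]
        simp [h0']

-- ===== VERDICT (by name: the statement is the Claim_ definition above) =====
theorem LoadState_py_spec : Claim_equal_LoadState_py := by
  intro xs _
  unfold Spec_LoadState_py LoadState_py LoadState_py_alt
  have := loadState_phase0 xs [] (by simp)
  simp only [this]
  have s03 : PySem.List.slice xs (some 0) (some 3) = xs.take 3 := by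
    simpa using PySem.List.slice_natCast (xs := xs) (a := 0) (b := 3)
  have s36 : PySem.List.slice xs (some 3) (some 6) = (xs.drop 3).take 3 := by
    simpa using PySem.List.slice_natCast (xs := xs) (a := 3) (b := 6)
  have s69 : PySem.List.slice xs (some 6) (some 9) = (xs.drop 6).take 3 := by
    simpa using PySem.List.slice_natCast (xs := xs) (a := 6) (b := 9)
  simp [s03, s36, s69, List.drop_drop]
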